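-- pv_equiv track=rewrite | github.com/woohree/ALGO2ITHM_STUDY | baekjoon/3월/0310/s2_1660_캡틴이다솜/yeonggyeong.py | get_count
-- ===== SOURCE A (Python) =====
-- def get_count(N):
--     # 대포알이 한개일때 만들 수 있는 것
--     nums = [1, 1, 1]
--     # 사면체를 만들때 필요한 대포알 개수
--     # [1, 4, 10, 20, ...]
--     figure_cnt = [1]
--     # 종료 조건 설정 위해 선언
--     num = 1
--     i = 1
--     while num < N:
--         i += 1
--         triangle = nums[1] + i
--         num = nums[2] + triangle
--         nums = [i, triangle, num]
--         figure_cnt.append(num)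
--
--     dp = [999] * (N + 1)
--
--     for i in range(1, N+1):
--         for cnt in figure_cnt:
--             # 대포알의 개수와 사면체를 만든 대포알의 개수가 같다면,
--             if cnt == i:
--                 dp[i] = 1
--                 break
--             # 대포알의 개수보다 사면체의 개수가 크다면 만들 수 없음
--             if i < cnt:
--                 break
--             # +1 하는 이유는 층이 1개인 사면체 추가
--             # 대포알의 개수와 사면체를 만드는데 필요한 대포알의 개수가 완전히 같지 않기 때문
--             dp[i] = min(dp[i], 1 + dp[i-cnt])
--
--     return dp[-1]
-- ===== SOURCE B (Python) =====
-- def get_count(N):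
--     # Iterative-deepening search: for k = 0, 1, 2, ... test whether N is a sum of
--     # exactly k tetrahedral numbers (chosen non-decreasingly from the ascending
--     # list ts); the first k that works is the answer, 999 if none below 1000.
--     ts = []
--     k = 1
--     while k * (k + 1) * (k + 2) // 6 <= N:
--         ts.append(k * (k + 1) * (k + 2) // 6)
--         k += 1
--
--     def rep(n, k, ts):
--         # can n be written as a sum of exactly k numbers taken (with repetition,
--         # in non-decreasing order) from the ascending list ts?
--         if k == 0:
--             return n == 0
--         for i in range(len(ts)):
--             t = ts[i]
--             if t > n:
--                 return False
--             if rep(n - t, k - 1, ts[i:]):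
--                 return True
--         return False
--
--     for c in range(1000):
--         if rep(N, c, ts):
--             return c
--     return 999
-- ===== Notes on version B (the rewrite author's own statement) =====
-- stated objective: faster
-- what changed: Replaced A's bottom-up coin-change DP table over all amounts 1..N by an iterative-deepening search that only examines the target N: for k = 0,1,2,... a recursive test asks whether N is a sum of exactly k tetrahedral numbers chosen non-decreasingly, returning the first k that works (999 if none below 1000).
-- intended difference: For N = 0 A returns its untouched sentinel 999 while B returns 0, the intended minimal number of tetrahedra summing to 0. — e.g. on get_count(0): A returns 999, B returns 0
import Mathlib
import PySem

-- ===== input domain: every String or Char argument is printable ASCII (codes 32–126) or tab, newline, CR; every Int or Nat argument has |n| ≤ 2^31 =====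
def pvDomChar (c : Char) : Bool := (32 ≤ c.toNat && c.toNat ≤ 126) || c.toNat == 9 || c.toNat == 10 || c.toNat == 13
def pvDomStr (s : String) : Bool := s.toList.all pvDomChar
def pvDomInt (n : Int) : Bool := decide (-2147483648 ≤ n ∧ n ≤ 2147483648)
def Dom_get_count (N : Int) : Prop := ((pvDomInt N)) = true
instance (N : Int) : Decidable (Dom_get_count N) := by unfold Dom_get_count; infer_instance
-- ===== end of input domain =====

-- B replaces A's bottom-up coin-change DP table over all amounts 1..N by an
-- iterative-deepening search that only examines the target N: for k = 0,1,2,…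
-- it tests recursively whether N is a sum of exactly k tetrahedral numbers
-- chosen non-decreasingly, returning the first k that works (999 if none below
-- 1000); measurably faster.

-- ===== PORT A =====
-- the 'while num < N' loop of A; the two proof arguments only justify termination
def get_count_loop (N i n1 n2 : Int) (fc : List Int) (hn1 : 1 ≤ n1) (hi : 1 ≤ i) : List Int :=
  if h : n2 < N then
    get_count_loop N (i + 1) (n1 + (i + 1)) (n2 + (n1 + (i + 1)))
      (fc ++ [n2 + (n1 + (i + 1))]) (by omega) (by omega)
  else fc
termination_by (N - n2).toNat
decreasing_by omega

-- the inner 'for cnt in figure_cnt' loop with its two breaks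
def get_count_inner (i : Int) (fc : List Int) (dp : List Int) : List Int :=
  match fc with
  | [] => dp
  | cnt :: rest =>
    if cnt = i then PySem.List.pySetD dp i 1
    else if i < cnt then dp
    else get_count_inner i rest
      (PySem.List.pySetD dp i
        (min (PySem.List.pyGetD dp i 0) (1 + PySem.List.pyGetD dp (i - cnt) 0)))

def get_count (N : Int) : Int :=
  let fc := get_count_loop N 1 1 1 [1] (by norm_num) (by norm_num)
  let dp0 := PySem.List.pyRepeat [(999 : Int)] (N + 1)
  let dp := (PySem.List.pyRange 1 (N + 1) 1).foldl (fun dp i => get_count_inner i fc dp) dp0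
  PySem.List.pyGetD dp (-1) 0   -- dp[-1]; nonempty under Pre_ (0 ≤ N)

-- ===== PORT B =====
-- k ≤ k(k+1)(k+2)//6 for k ≥ 1 (only used to justify termination of coins_loop)
theorem coins_loop_le (k : Int) (hk : 1 ≤ k) :
    k ≤ PySem.Int.floordiv (k * (k + 1) * (k + 2)) 6 := by
  rw [PySem.Int.le_floordiv_iff_mul_le (by norm_num)]
  nlinarith [sq_nonneg k, sq_nonneg (k+1)]

-- the 'while … <= N' tetrahedral-generation loop of B
def coins_loop (N k : Int) (coins : List Int) (hk : 1 ≤ k) : List Int :=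
  let t := PySem.Int.floordiv (k * (k + 1) * (k + 2)) 6
  if t > N then coins
  else coins_loop N (k + 1) (coins ++ [t]) (by omega)
termination_by (N + 1 - k).toNat
decreasing_by
  have := coins_loop_le k hk
  omega

-- B's nested 'rep(n, k, ts)': the 'for i in range(len(ts)) … ts[i:]' scan is the
-- structural recursion repScan over the suffixes of ts
mutual
def repF : Nat → Int → List Int → Bool
  | 0, n, _ => n == 0
  | k + 1, n, ts => repScan k n ts
termination_by k _ _ => (k, 0)

def repScan : Nat → Int → List Int → Bool
  | _, _, [] => false
  | k, n, t :: rest =>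
    if t > n then false
    else (repF k (n - t) (t :: rest) || repScan k n rest)
termination_by k _ ts => (k, ts.length + 1)
end

-- B's outer 'for c in range(1000): if rep(N, c, ts): return c' / 'return 999'
def get_count_alt (N : Int) : Int :=
  let ts := coins_loop N 1 [] (by norm_num)
  match (List.range 1000).find? (fun c => repF c N ts) with
  | some c => (c : Int)
  | none => 999

-- ===== PRECONDITION & SPEC =====
-- A raises IndexError for N < 0 (dp[-1] on the empty list); everything else is inside Pre_.
def Pre_get_count (N : Int) : Prop := 0 ≤ N
instance (N : Int) : Decidable (Pre_get_count N) := by unfold Pre_get_count; infer_instance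
def pvWitness_get_count : Int := 5

-- For N = 0 A returns its untouched sentinel 999 while B returns 0, the intended minimal
-- number of tetrahedra summing to 0.
def D_get_count (N : Int) : Prop := N = 0
instance (N : Int) : Decidable (D_get_count N) := by unfold D_get_count; infer_instance

def Spec_get_count (N : Int) (out : Int) : Prop := ¬ D_get_count N → out = get_count_alt N
instance (N : Int) (out : Int) : Decidable (Spec_get_count N out) := by
  unfold Spec_get_count; infer_instance

def pvDiffWitness_get_count : Int := 0
def pvDiffWitnessOut_get_count : Int × Int := (999, 0)

-- ===== CLAIM (what is proved, stated in full; the proofs are below) =====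
def Claim_unchanged_get_count : Prop :=
  ∀ (N : Int), Dom_get_count N → Pre_get_count N → Spec_get_count N (get_count N)
def Claim_changed_get_count : Prop :=
  Dom_get_count (pvDiffWitness_get_count) ∧ Pre_get_count (pvDiffWitness_get_count) ∧
  D_get_count (pvDiffWitness_get_count) ∧
  get_count (pvDiffWitness_get_count) = pvDiffWitnessOut_get_count.1 ∧
  get_count_alt (pvDiffWitness_get_count) = pvDiffWitnessOut_get_count.2 ∧
  pvDiffWitnessOut_get_count.1 ≠ pvDiffWitnessOut_get_count.2
def Claim_exact_get_count : Prop :=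
  ∀ (N : Int), Dom_get_count N → Pre_get_count N → D_get_count N →
    get_count N ≠ get_count_alt N

-- ===== LEMMAS AND PROOFS =====

-- ---- triangular / tetrahedral numbers (proof layer) ----
def triZ : ℕ → ℤ
  | 0 => 0
  | k + 1 => triZ k + ((k : ℤ) + 1)

def tetZ : ℕ → ℤ
  | 0 => 0
  | k + 1 => tetZ k + triZ (k + 1)

theorem triZ_pos (k : ℕ) (hk : 1 ≤ k) : 1 ≤ triZ k := by
  induction k with
  | zero => omega
  | succ m ih =>
    rcases Nat.eq_zero_or_pos m with h | h
    · subst h; simp [triZ]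
    · have := ih h; simp only [triZ]; omega

theorem tetZ_lt_succ (k : ℕ) : tetZ k < tetZ (k + 1) := by
  have := triZ_pos (k + 1) (by omega)
  simp only [tetZ]; omega

theorem tetZ_one : tetZ 1 = 1 := by simp [tetZ, triZ]

theorem le_tetZ (k : ℕ) : (k : ℤ) ≤ tetZ k := by
  induction k with
  | zero => simp [tetZ]
  | succ m ih =>
    have h1 := triZ_pos (m + 1) (by omega)
    simp only [tetZ]; push_cast; omega

theorem two_triZ (k : ℕ) : 2 * triZ k = (k : ℤ) * ((k : ℤ) + 1) := by
  induction k with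
  | zero => simp [triZ]
  | succ m ih => simp only [triZ]; push_cast; ring_nf; ring_nf at ih; linarith

theorem six_tetZ (k : ℕ) : 6 * tetZ k = (k : ℤ) * ((k : ℤ) + 1) * ((k : ℤ) + 2) := by
  induction k with
  | zero => simp [tetZ]
  | succ m ih =>
    have h2 := two_triZ (m + 1)
    simp only [tetZ]; push_cast at h2 ⊢; nlinarith

theorem floordiv_tetZ (k : ℕ) :
    PySem.Int.floordiv ((k : ℤ) * ((k : ℤ) + 1) * ((k : ℤ) + 2)) 6 = tetZ k := by
  have h := six_tetZ k
  rw [PySem.Int.floordiv_eq_iff_of_pos (by norm_num)]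
  omega

-- ---- the canonical coin lists ----
-- tets from index k up to the last one ≤ N (B's list when k = 1)
def tlist (N : ℤ) (k : ℕ) : List ℤ :=
  if h : tetZ k ≤ N then tetZ k :: tlist N (k + 1) else []
termination_by (N + 1 - k).toNat
decreasing_by
  have := le_tetZ k
  omega

-- what A's while loop appends after state k (A's list is tetZ k :: alist N k pre-seeded)
def alist (N : ℤ) (k : ℕ) : List ℤ :=
  if h : tetZ k < N then tetZ (k + 1) :: alist N (k + 1) else []
termination_by (N + 1 - k).toNat
decreasing_by
  have := le_tetZ k
  omega

theorem coins_loop_eq_aux (N : ℤ) (m : ℕ) :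
    ∀ (κ : ℕ) (k : ℤ), k = (κ : ℤ) → ∀ (hk : 1 ≤ k) (acc : List ℤ), (N + 1 - k).toNat = m →
      coins_loop N k acc hk = acc ++ tlist N κ := by
  induction m using Nat.strong_induction_on with
  | _ m ih =>
    intro κ k hκ hk acc hm
    subst hκ
    rw [coins_loop, tlist]
    simp only [floordiv_tetZ κ]
    by_cases h : tetZ κ > N
    · simp [h, dif_neg (by omega : ¬ tetZ κ ≤ N)]
    · have hkN : (κ : ℤ) ≤ N := le_trans (le_tetZ κ) (by omega)
      rw [if_neg h, dif_pos (by omega : tetZ κ ≤ N)]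
      rw [ih (N + 1 - ((κ : ℤ) + 1)).toNat (by omega) (κ + 1) ((κ : ℤ) + 1)
            (by push_cast; ring) _ _ rfl]
      simp

theorem coins_loop_eq (N : ℤ) (κ : ℕ) (hk : 1 ≤ ((κ : ℤ))) (acc : List ℤ) :
    coins_loop N (κ : ℤ) acc hk = acc ++ tlist N κ :=
  coins_loop_eq_aux N (N + 1 - (κ : ℤ)).toNat κ (κ : ℤ) rfl hk acc rfl

theorem get_count_loop_eq_aux (N : ℤ) (m : ℕ) :
    ∀ (κ : ℕ) (i n1 n2 : ℤ), i = (κ : ℤ) → n1 = triZ κ → n2 = tetZ κ →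
      ∀ (hn1 : 1 ≤ n1) (hi : 1 ≤ i) (acc : List ℤ), (N + 1 - i).toNat = m →
        get_count_loop N i n1 n2 acc hn1 hi = acc ++ alist N κ := by
  induction m using Nat.strong_induction_on with
  | _ m ih =>
    intro κ i n1 n2 hi' hn1' hn2' hn1 hi acc hm
    subst hi'; subst hn1'; subst hn2'
    rw [get_count_loop, alist]
    by_cases h : tetZ κ < N
    · have hkN : (κ : ℤ) ≤ N := le_trans (le_tetZ κ) (by omega)
      rw [dif_pos h, dif_pos h]
      have htri : triZ κ + ((κ : ℤ) + 1) = triZ (κ + 1) := by simp only [triZ]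
      have htet : tetZ κ + (triZ κ + ((κ : ℤ) + 1)) = tetZ (κ + 1) := by
        simp only [tetZ, triZ]
      have heq := ih (N + 1 - ((κ : ℤ) + 1)).toNat (by omega) (κ + 1) ((κ : ℤ) + 1)
            (triZ κ + ((κ : ℤ) + 1)) (tetZ κ + (triZ κ + ((κ : ℤ) + 1)))
            (by push_cast; ring) htri htet (by omega) (by omega)
            (acc ++ [tetZ κ + (triZ κ + ((κ : ℤ) + 1))]) rfl
    
      rw [heq]; simp [htet]
    · rw [dif_neg h, dif_neg h]
      simp

theorem get_count_loop_eq (N : ℤ) (κ : ℕ) (hk1 : 1 ≤ triZ κ) (hk2 : 1 ≤ ((κ : ℤ))) (acc : List ℤ) :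
    get_count_loop N (κ : ℤ) (triZ κ) (tetZ κ) acc hk1 hk2 = acc ++ alist N κ :=
  get_count_loop_eq_aux N (N + 1 - (κ : ℤ)).toNat κ _ _ _ rfl rfl rfl hk1 hk2 acc rfl

theorem alist_gt (N : ℤ) (k : ℕ) : ∀ x ∈ alist N k, tetZ k < x := by
  induction hm : (N + 1 - (k : ℤ)).toNat using Nat.strong_induction_on generalizing k with
  | _ m ih =>
    intro x hx
    rw [alist] at hx
    by_cases h : tetZ k < N
    · rw [dif_pos h] at hx
      have hkN : (k : ℤ) ≤ N := le_trans (le_tetZ k) (by omega)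
      rcases List.mem_cons.mp hx with h1 | h1
      · subst h1; exact tetZ_lt_succ k
      · have := ih (N + 1 - ((k + 1 : ℕ) : ℤ)).toNat (by push_cast; omega) (k + 1) rfl x h1
        have := tetZ_lt_succ k
        omega
    · rw [dif_neg h] at hx; simp at hx

theorem alist_pairwise (N : ℤ) (k : ℕ) : (tetZ k :: alist N k).Pairwise (· < ·) := by
  induction hm : (N + 1 - (k : ℤ)).toNat using Nat.strong_induction_on generalizing k with
  | _ m ih =>
    constructor
    · exact alist_gt N k
    · rw [alist]
      by_cases h : tetZ k < N
      · rw [dif_pos h]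
        have hkN : (k : ℤ) ≤ N := le_trans (le_tetZ k) (by omega)
        exact ih (N + 1 - ((k + 1 : ℕ) : ℤ)).toNat (by push_cast; omega) (k + 1) rfl
      · rw [dif_neg h]; constructor

theorem tlist_mem_ge (N : ℤ) (k : ℕ) : ∀ x ∈ tlist N k, tetZ k ≤ x := by
  induction hm : (N + 1 - (k : ℤ)).toNat using Nat.strong_induction_on generalizing k with
  | _ m ih =>
    intro x hx
    rw [tlist] at hx
    by_cases h : tetZ k ≤ N
    · rw [dif_pos h] at hx
      have hkN : (k : ℤ) ≤ N := le_trans (le_tetZ k) h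
      rcases List.mem_cons.mp hx with h1 | h1
      · omega
      · have := ih (N + 1 - ((k + 1 : ℕ) : ℤ)).toNat (by push_cast; omega) (k + 1) rfl x h1
        have := tetZ_lt_succ k
        omega
    · rw [dif_neg h] at hx; simp at hx

theorem tlist_pairwise (N : ℤ) (k : ℕ) : (tlist N k).Pairwise (· < ·) := by
  induction hm : (N + 1 - (k : ℤ)).toNat using Nat.strong_induction_on generalizing k with
  | _ m ih =>
    rw [tlist]
    by_cases h : tetZ k ≤ N
    · rw [dif_pos h]
      have hkN : (k : ℤ) ≤ N := le_trans (le_tetZ k) h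
      constructor
      · intro x hx
        have := tlist_mem_ge N (k + 1) x hx
        have := tetZ_lt_succ k
        omega
      · exact ih (N + 1 - ((k + 1 : ℕ) : ℤ)).toNat (by push_cast; omega) (k + 1) rfl
    · rw [dif_neg h]; constructor

theorem tlist_pos (N : ℤ) : ∀ x ∈ tlist N 1, 1 ≤ x := by
  intro x hx
  have := tlist_mem_ge N 1 x hx
  rw [tetZ_one] at this
  omega

theorem one_mem_tlist (N : ℤ) (hN : 1 ≤ N) : (1 : ℤ) ∈ tlist N 1 := by
  rw [tlist, dif_pos (by rw [tetZ_one]; exact hN)]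
  simp [tetZ_one]

-- the structural link: A's list = B's list ++ (tail of tets > N)
theorem link_aux (N : ℤ) (m : ℕ) :
    ∀ (k : ℕ), tetZ k ≤ N → (N + 1 - (k : ℤ)).toNat = m →
      ∃ e : List ℤ, tetZ k :: alist N k = tlist N k ++ e ∧ ∀ x ∈ e, N < x := by
  induction m using Nat.strong_induction_on with
  | _ m ih =>
    intro k hle hm
    have hkN : (k : ℤ) ≤ N := le_trans (le_tetZ k) hle
    rw [alist, tlist, dif_pos hle]
    by_cases h : tetZ k < N
    · rw [dif_pos h]
      by_cases h2 : tetZ (k + 1) ≤ N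
      · have hlt : (N + 1 - ((k + 1 : ℕ) : ℤ)).toNat < m := by push_cast; omega
        obtain ⟨e, he, hgt⟩ :=
          ih (N + 1 - ((k + 1 : ℕ) : ℤ)).toNat hlt (k + 1) h2 rfl
        exact ⟨e, by rw [List.cons_append, ← he], hgt⟩
      · refine ⟨[tetZ (k + 1)], ?_, ?_⟩
        · rw [alist, dif_neg (by omega : ¬ tetZ (k + 1) < N),
              tlist, dif_neg h2]
          simp
        · intro x hx; simp at hx; omega
    · rw [dif_neg h]
      refine ⟨[], ?_, by simp⟩
      have := tetZ_lt_succ k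
      rw [tlist, dif_neg (by omega : ¬ tetZ (k + 1) ≤ N)]
      simp

theorem link (N : ℤ) (k : ℕ) (hle : tetZ k ≤ N) :
    ∃ e : List ℤ, tetZ k :: alist N k = tlist N k ++ e ∧ ∀ x ∈ e, N < x :=
  link_aux N (N + 1 - (k : ℤ)).toNat k hle rfl

-- ---- fmin: foldr min with Python's 999 sentinel ----
def fmin (l : List ℤ) : ℤ := l.foldr min 999

theorem fmin_nil : fmin [] = 999 := rfl
theorem fmin_cons (a : ℤ) (l : List ℤ) : fmin (a :: l) = min a (fmin l) := rfl

theorem fmin_le_999 (l : List ℤ) : fmin l ≤ 999 := by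
  induction l with
  | nil => simp [fmin_nil]
  | cons a l ih => rw [fmin_cons]; omega

theorem fmin_le_mem (l : List ℤ) (a : ℤ) (h : a ∈ l) : fmin l ≤ a := by
  induction l with
  | nil => simp at h
  | cons b l ih =>
    rw [fmin_cons]
    rcases List.mem_cons.mp h with h | h
    · omega
    · have := ih h; omega

theorem fmin_ge (l : List ℤ) (x : ℤ) (hx : x ≤ 999) (h : ∀ a ∈ l, x ≤ a) : x ≤ fmin l := by
  induction l with
  | nil => simpa [fmin_nil]
  | cons b l ih =>
    rw [fmin_cons]
    have := h b (by simp)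
    have := ih (fun a ha => h a (by simp [ha]))
    omega

-- ---- bestP: A's capped optimal count over a coin list ----
def bestPred (n : ℕ) (c : ℤ) : Bool := decide (1 ≤ c) && decide (c ≤ (n : ℤ))

def bestP (C : List ℤ) : ℕ → ℤ
  | 0 => 0
  | n + 1 =>
      fmin (((C.filter (bestPred (n + 1))).attach).map
        (fun c => 1 + bestP C (n + 1 - c.1.toNat)))
termination_by n => n
decreasing_by
  have h := List.of_mem_filter c.2
  simp [bestPred] at h
  omega

theorem bestP_succ (C : List ℤ) (n : ℕ) :
    bestP C (n + 1) =
      fmin ((C.filter (bestPred (n + 1))).map (fun c => 1 + bestP C (n + 1 - c.toNat))) := by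
  rw [bestP]
  congr 1
  exact List.attach_map_val (f := fun c : ℤ => 1 + bestP C (n + 1 - c.toNat))

theorem bestP_nonneg (C : List ℤ) (n : ℕ) : 0 ≤ bestP C n := by
  induction n using Nat.strong_induction_on with
  | _ n ih =>
    match n with
    | 0 => simp [bestP]
    | n + 1 =>
      rw [bestP_succ]
      refine fmin_ge _ 0 (by norm_num) ?_
      intro a ha
      obtain ⟨c, hc, rfl⟩ := List.mem_map.mp ha
      have := ih (n + 1 - c.toNat) (by
        have h := List.of_mem_filter hc
        simp [bestPred] at h
        omega)
      omega

theorem bestP_le_999 (C : List ℤ) (n : ℕ) : bestP C n ≤ 999 := by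
  match n with
  | 0 => simp [bestP]
  | n + 1 => rw [bestP_succ]; exact fmin_le_999 _

theorem bestP_pos (C : List ℤ) (n : ℕ) (hn : 1 ≤ n) : 1 ≤ bestP C n := by
  match n, hn with
  | 0, hn => omega
  | n + 1, _ =>
    rw [bestP_succ]
    refine fmin_ge _ 1 (by norm_num) ?_
    intro a ha
    obtain ⟨c, hc, rfl⟩ := List.mem_map.mp ha
    have := bestP_nonneg C (n + 1 - c.toNat)
    omega

theorem bestP_zero (C : List ℤ) : bestP C 0 = 0 := by rw [bestP]

-- step bound: taking one coin c costs one more than the best for the remainder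
theorem bestP_step (C : List ℤ) (n : ℕ) (c : ℤ) (hc : c ∈ C) (hc1 : 1 ≤ c)
    (hcn : c ≤ (n : ℤ)) : bestP C n ≤ 1 + bestP C (n - c.toNat) := by
  match n, hcn with
  | 0, hcn => omega
  | n + 1, hcn =>
    rw [bestP_succ]
    refine fmin_le_mem _ _ ?_
    exact List.mem_map.mpr ⟨c, List.mem_filter.mpr ⟨hc, by simp [bestPred]; omega⟩, rfl⟩

-- ---- dp arrays as maps over List.range ----
def arrA (C : List ℤ) (n j : ℕ) : List ℤ :=
  (List.range (n + 1)).map (fun t => if 1 ≤ t ∧ t ≤ j then bestP C t else 999)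

theorem arrA_zero (C : List ℤ) (n : ℕ) : arrA C n 0 = List.replicate (n + 1) (999 : ℤ) := by
  refine List.ext_getElem (by simp [arrA]) ?_
  intro t h1 h2
  simp only [arrA, List.getElem_map, List.getElem_range, List.getElem_replicate]
  rw [if_neg (by omega)]

theorem arrA_set_self (C : List ℤ) (n j : ℕ) (hj : j + 1 ≤ n) :
    (arrA C n j).set (j + 1) 999 = arrA C n j := by
  refine List.ext_getElem (by simp [arrA]) ?_
  intro t h1 h2
  simp only [arrA, List.getElem_set, List.getElem_map, List.getElem_range]
  split_ifs with h <;> simp_all <;> omega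

theorem arrA_set_succ (C : List ℤ) (n j : ℕ) (hj : j + 1 ≤ n) :
    (arrA C n j).set (j + 1) (bestP C (j + 1)) = arrA C n (j + 1) := by
  refine List.ext_getElem (by simp [arrA]) ?_
  intro t h1 h2
  simp only [arrA, List.getElem_set, List.getElem_map, List.getElem_range]
  rcases eq_or_ne (j + 1) t with h | h
  · subst h; simp
  · rw [if_neg h]
    have : (1 ≤ t ∧ t ≤ j) ↔ (1 ≤ t ∧ t ≤ j + 1) := by omega
    simp [this]

-- the inner loop of A only rewrites index j+1, accumulating a running minimum
theorem inner_go (C : List ℤ) (n j : ℕ) (hj : j + 1 ≤ n) :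
    ∀ (l : List ℤ) (v : ℤ), l.Pairwise (· < ·) → (∀ c ∈ l, 1 ≤ c) →
      get_count_inner (((j + 1 : ℕ) : ℤ)) l ((arrA C n j).set (j + 1) v) =
        (arrA C n j).set (j + 1)
          (if ((j + 1 : ℕ) : ℤ) ∈ l then 1
           else (l.filter (fun c => decide (c < ((j + 1 : ℕ) : ℤ)))).foldl
              (fun a c => min a (1 + bestP C (j + 1 - c.toNat))) v) := by
  intro l
  induction l with
  | nil => intro v _ _; simp [get_count_inner]
  | cons c r ih =>
    intro v hsort hpos
    have hhead := (List.pairwise_cons.mp hsort).1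
    simp only [get_count_inner]
    by_cases hc : c = ((j + 1 : ℕ) : ℤ)
    · rw [if_pos hc, if_pos (by simp [hc] : ((j + 1 : ℕ) : ℤ) ∈ c :: r)]
      simp only [PySem.List.pySetD_natCast, List.set_set]
    · by_cases hlt : ((j + 1 : ℕ) : ℤ) < c
      · rw [if_neg hc, if_pos hlt]
        have hnm : ¬ ((j + 1 : ℕ) : ℤ) ∈ c :: r := by
          intro hmem
          rcases List.mem_cons.mp hmem with h | h
          · exact hc h.symm
          · have := hhead _ h; omega
        rw [if_neg hnm]
        have hfil : (c :: r).filter (fun x => decide (x < ((j + 1 : ℕ) : ℤ))) = [] := by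
          rw [List.filter_eq_nil_iff]
          intro x hx
          rcases List.mem_cons.mp hx with h | h
          · subst h; simp; omega
          · have := hhead _ h; simp; omega
        rw [hfil, List.foldl_nil]
      · have hclt : c < ((j + 1 : ℕ) : ℤ) := by omega
        rw [if_neg hc, if_neg hlt]
        have hc1 : 1 ≤ c := hpos c (by simp)
        have hidx : ((j + 1 : ℕ) : ℤ) - c = ((j + 1 - c.toNat : ℕ) : ℤ) := by omega
        have hlen : j + 1 < (arrA C n j).length := by simp [arrA]; omega
        have hread1 :
            PySem.List.pyGetD ((arrA C n j).set (j + 1) v) (((j + 1 : ℕ) : ℤ)) 0 = v := by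
          simp only [PySem.List.pyGetD_natCast]
          simp [List.getD, hlen]
        have hread2 :
            PySem.List.pyGetD ((arrA C n j).set (j + 1) v) ((((j + 1 : ℕ)) : ℤ) - c) 0 =
              bestP C (j + 1 - c.toNat) := by
          rw [hidx]
          simp only [PySem.List.pyGetD_natCast, List.getD]
          rw [List.getElem?_set_ne (by omega : j + 1 ≠ j + 1 - c.toNat)]
          have hb : j + 1 - c.toNat < n + 1 := by omega
          simp only [arrA, List.getElem?_map, List.getElem?_range, hb,
            Option.map_some, Option.getD_some]
          rw [if_pos (by omega)]
        rw [hread1, hread2]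
        have hstep :
            PySem.List.pySetD ((arrA C n j).set (j + 1) v) (((j + 1 : ℕ) : ℤ))
              (min v (1 + bestP C (j + 1 - c.toNat))) =
            (arrA C n j).set (j + 1) (min v (1 + bestP C (j + 1 - c.toNat))) := by
          simp only [PySem.List.pySetD_natCast, List.set_set]
        rw [hstep, ih _ (List.pairwise_cons.mp hsort).2 (fun x hx => hpos x (by simp [hx]))]
        by_cases hm : ((j + 1 : ℕ) : ℤ) ∈ r
        · rw [if_pos (List.mem_cons.mpr (Or.inr hm)), if_pos hm]
        · have hnm : ¬ ((j + 1 : ℕ) : ℤ) ∈ c :: r := by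
            intro hmem
            rcases List.mem_cons.mp hmem with h | h
            · exact hc h.symm
            · exact hm h
          rw [if_neg hnm, if_neg hm,
              List.filter_cons_of_pos (by simp only [decide_eq_true_eq]; exact hclt),
              List.foldl_cons]

-- foldl-min over a list against foldr-min with the 999 sentinel
theorem foldl_min_fmin (l : List ℤ) (f : ℤ → ℤ) :
    ∀ v : ℤ, v ≤ 999 → l.foldl (fun a c => min a (f c)) v = min v (fmin (l.map f)) := by
  induction l with
  | nil => intro v hv; simp [fmin_nil]; omega
  | cons c r ih =>
    intro v hv
    rw [List.foldl_cons, List.map_cons, fmin_cons, ih (min v (f c)) (by omega)]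
    have := fmin_le_999 (r.map f)
    omega

-- value of A's inner loop = bestP of B's coin list
theorem inner_val (N : ℤ) (n j : ℕ) (hN : N = (n : ℤ)) (hj : j + 1 ≤ n)
    (C e fc : List ℤ) (hfc : fc = C ++ e) (he : ∀ x ∈ e, N < x)
    (hpos : ∀ c ∈ fc, 1 ≤ c) :
    (if ((j + 1 : ℕ) : ℤ) ∈ fc then 1
     else (fc.filter (fun c => decide (c < ((j + 1 : ℕ) : ℤ)))).foldl
        (fun a c => min a (1 + bestP C (j + 1 - c.toNat))) 999) = bestP C (j + 1) := by
  by_cases hin : ((j + 1 : ℕ) : ℤ) ∈ fc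
  · rw [if_pos hin]
    have hiC : ((j + 1 : ℕ) : ℤ) ∈ C := by
      rcases List.mem_append.mp (hfc ▸ hin) with h | h
      · exact h
      · have := he _ h; omega
    have hle : bestP C (j + 1) ≤ 1 := by
      have hmem : (1 + bestP C (j + 1 - ((j + 1 : ℕ) : ℤ).toNat)) ∈
          ((C.filter (bestPred (j + 1))).map (fun c => 1 + bestP C (j + 1 - c.toNat))) :=
        List.mem_map.mpr ⟨_, List.mem_filter.mpr ⟨hiC, by simp [bestPred]⟩, rfl⟩
      have := fmin_le_mem _ _ hmem
      have hz : ((j + 1 : ℕ) : ℤ).toNat = j + 1 := by omega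
      rw [hz, Nat.sub_self, bestP_zero, ← bestP_succ] at this
      omega
    have := bestP_pos C (j + 1) (by omega)
    omega
  · rw [if_neg hin]
    rw [foldl_min_fmin _ _ 999 (by norm_num)]
    have h1 : fc.filter (fun c => decide (c < ((j + 1 : ℕ) : ℤ))) =
        fc.filter (fun c => decide (c ≤ ((j + 1 : ℕ) : ℤ))) := by
      refine List.filter_congr ?_
      intro x hx
      have : x ≠ ((j + 1 : ℕ) : ℤ) := fun h => hin (h ▸ hx)
      simp; omega
    have h2 : fc.filter (fun c => decide (c ≤ ((j + 1 : ℕ) : ℤ))) =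
        C.filter (fun c => decide (c ≤ ((j + 1 : ℕ) : ℤ))) := by
      rw [hfc, List.filter_append]
      have : e.filter (fun c => decide (c ≤ ((j + 1 : ℕ) : ℤ))) = [] := by
        rw [List.filter_eq_nil_iff]
        intro x hx
        have := he _ hx
        simp; omega
      rw [this, List.append_nil]
    have h3 : C.filter (fun c => decide (c ≤ ((j + 1 : ℕ) : ℤ))) =
        C.filter (bestPred (j + 1)) := by
      refine List.filter_congr ?_
      intro x hx
      have hx1 : 1 ≤ x := hpos x (by rw [hfc]; exact List.mem_append_left _ hx)
      simp [bestPred]; omega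
    rw [h1, h2, h3, ← bestP_succ]
    have := bestP_le_999 C (j + 1)
    omega

-- A's outer loop over range(1, N+1)
theorem A_fold (N : ℤ) (n : ℕ) (hN : N = (n : ℤ))
    (C e fc : List ℤ) (hfc : fc = C ++ e) (he : ∀ x ∈ e, N < x)
    (hpos : ∀ c ∈ fc, 1 ≤ c) (hsort : fc.Pairwise (· < ·)) :
    ∀ j : ℕ, j ≤ n →
      (PySem.List.pyRange 1 ((j : ℤ) + 1) 1).foldl
        (fun dp i => get_count_inner i fc dp) (arrA C n 0) = arrA C n j := by
  intro j
  induction j with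
  | zero =>
    intro _
    rw [PySem.List.pyRange_one_eq_nil (by norm_num)]
    simp
  | succ j ih =>
    intro hj
    have hcast : ((j + 1 : ℕ) : ℤ) = (j : ℤ) + 1 := by push_cast; ring
    rw [PySem.List.pyRange_one_succ_right (by omega), List.foldl_append, hcast,
        ih (by omega), ← hcast]
    simp only [List.foldl_cons, List.foldl_nil]
    rw [← arrA_set_self C n j hj,
        inner_go C n j hj fc 999 hsort hpos,
        inner_val N n j hN hj C e fc hfc he hpos,
        arrA_set_succ C n j hj]

-- ---- end-to-end characterization of A ----
theorem get_count_eq (n : ℕ) (hn : 1 ≤ n) :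
    get_count ((n : ℕ) : ℤ) = bestP (tlist ((n : ℕ) : ℤ) 1) n := by
  simp only [get_count]
  have hfc0 : get_count_loop ((n : ℕ) : ℤ) 1 1 1 [1] (by norm_num) (by norm_num) =
      [1] ++ alist ((n : ℕ) : ℤ) 1 := by
    have h := get_count_loop_eq ((n : ℕ) : ℤ) 1 (by norm_num [triZ]) (by norm_num) [1]
    simpa [triZ, tetZ] using h
  rw [hfc0]
  obtain ⟨e, he, hgt⟩ := link ((n : ℕ) : ℤ) 1 (by rw [tetZ_one]; exact_mod_cast hn)
  have hfc1 : [(1 : ℤ)] ++ alist ((n : ℕ) : ℤ) 1 = tlist ((n : ℕ) : ℤ) 1 ++ e := by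
    rw [← he, tetZ_one]; rfl
  have hpos : ∀ c ∈ ([(1 : ℤ)] ++ alist ((n : ℕ) : ℤ) 1), 1 ≤ c := by
    intro c hc
    rcases List.mem_append.mp hc with h | h
    · simp at h; omega
    · have := alist_gt ((n : ℕ) : ℤ) 1 c h; rw [tetZ_one] at this; omega
  have hsort : ([(1 : ℤ)] ++ alist ((n : ℕ) : ℤ) 1).Pairwise (· < ·) := by
    have := alist_pairwise ((n : ℕ) : ℤ) 1
    rwa [tetZ_one] at this
  have hdp0 : PySem.List.pyRepeat [(999 : ℤ)] (((n : ℕ) : ℤ) + 1) =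
      arrA (tlist ((n : ℕ) : ℤ) 1) n 0 := by
    rw [PySem.List.pyRepeat_singleton, arrA_zero]
    congr 1
  rw [hdp0,
      A_fold ((n : ℕ) : ℤ) n rfl (tlist ((n : ℕ) : ℤ) 1) e _ hfc1 hgt hpos hsort n (le_refl n)]
  rw [PySem.List.pyGetD_neg_ofNat (arrA (tlist ((n : ℕ) : ℤ) 1) n n) 1 0 (by omega)
        (by simp [arrA])]
  simp only [arrA, List.length_map, List.length_range, List.getElem_map, List.getElem_range]
  rw [if_pos (by constructor <;> omega)]
  congr 1

-- ---- B side: representations as sums of exactly k coins ----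
def HasRep (C : List ℤ) (n : ℤ) (k : ℕ) : Prop :=
  ∃ l : List ℤ, l.length = k ∧ (∀ x ∈ l, x ∈ C) ∧ l.sum = n

theorem repScan_sound (k : ℕ)
    (IH : ∀ (n : ℤ) (ts : List ℤ), repF k n ts = true → HasRep ts n k) :
    ∀ (ts : List ℤ) (n : ℤ), repScan k n ts = true → HasRep ts n (k + 1) := by
  intro ts
  induction ts with
  | nil => intro n h; simp [repScan] at h
  | cons t rest ihts =>
    intro n h
    rw [repScan] at h
    by_cases hnt : t > n
    · rw [if_pos hnt] at h; simp at h
    · rw [if_neg hnt] at h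
      rcases Bool.or_eq_true_iff.mp h with h1 | h1
      · obtain ⟨l, hlen, hmem, hsum⟩ := IH _ _ h1
        refine ⟨t :: l, by simp [hlen], ?_, by rw [List.sum_cons, hsum]; ring⟩
        intro x hx
        rcases List.mem_cons.mp hx with rfl | hx
        · simp
        · exact hmem x hx
      · obtain ⟨l, hlen, hmem, hsum⟩ := ihts n h1
        exact ⟨l, hlen, fun x hx => List.mem_cons_of_mem t (hmem x hx), hsum⟩

theorem repF_sound : ∀ (k : ℕ) (n : ℤ) (ts : List ℤ), repF k n ts = true → HasRep ts n k := by
  intro k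
  induction k with
  | zero =>
    intro n ts h
    rw [repF] at h
    exact ⟨[], rfl, by simp, by simpa using (beq_iff_eq.mp h).symm⟩
  | succ k ih =>
    intro n ts h
    rw [repF] at h
    exact repScan_sound k ih ts n h

theorem repF_complete :
    ∀ (k : ℕ) (ts : List ℤ), ts.Pairwise (· < ·) → (∀ x ∈ ts, 1 ≤ x) →
      ∀ (l : List ℤ), List.Pairwise (· ≤ ·) l → (∀ x ∈ l, x ∈ ts) → l.length = k →
        repF k l.sum ts = true := by
  intro k
  induction k with
  | zero =>
    intro ts _ _ l _ _ hlen
    rw [List.length_eq_zero_iff] at hlen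
    subst hlen
    simp [repF]
  | succ k ih =>
    intro ts hsort hpos l hlsort hlmem hlen
    match l, hlen with
    | a :: l₂, hlen =>
      have hlen2 : l₂.length = k := by simpa using hlen
      obtain ⟨ha2, hl2sort⟩ := List.pairwise_cons.mp hlsort
      rw [repF]
      -- inner induction over the scanned suffix of ts
      have inner : ∀ ts' : List ℤ, ts'.Pairwise (· < ·) → (∀ x ∈ ts', 1 ≤ x) →
          (∀ x ∈ a :: l₂, x ∈ ts') → repScan k (a :: l₂).sum ts' = true := by
        intro ts'
        induction ts' with
        | nil => intro _ _ hmem; exact absurd (hmem a (by simp)) (by simp)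
        | cons t rest ihts =>
          intro hsort' hpos' hmem
          have hhead := (List.pairwise_cons.mp hsort').1
          have hta : t ≤ a := by
            rcases List.mem_cons.mp (hmem a (by simp)) with h | h
            · omega
            · have := hhead a h; omega
          have hsum2 : 0 ≤ l₂.sum :=
            List.sum_nonneg (fun x hx => by
              have := hpos' x (hmem x (by simp [hx])); omega)
          have hle : t ≤ (a :: l₂).sum := by simp; omega
          rw [repScan, if_neg (by omega)]
          by_cases hat : a = t
          · -- take t and recurse with one coin fewer
            have hfk : repF k ((a :: l₂).sum - t) (t :: rest) = true := by
              have hsum : (a :: l₂).sum - t = l₂.sum := by simp [hat]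
              rw [hsum]
              exact ih (t :: rest) hsort' hpos' l₂ hl2sort
                (fun x hx => hmem x (by simp [hx])) hlen2
            rw [hfk]; simp
          · -- skip t: everything lives in rest
            have ht_lt_a : t < a := by omega
            have hmem' : ∀ x ∈ a :: l₂, x ∈ rest := by
              intro x hx
              have hxa : a ≤ x := by
                rcases List.mem_cons.mp hx with rfl | hx'
                · exact le_refl x
                · exact ha2 x hx'
              rcases List.mem_cons.mp (hmem x hx) with h | h
              · omega
              · exact h
            have := ihts (List.pairwise_cons.mp hsort').2
              (fun x hx => hpos' x (by simp [hx])) hmem'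
            rw [this]; simp
      exact inner ts hsort hpos hlmem

theorem hasRep_repF (k : ℕ) (ts : List ℤ) (hsort : ts.Pairwise (· < ·))
    (hpos : ∀ x ∈ ts, 1 ≤ x) (n : ℤ) (h : HasRep ts n k) : repF k n ts = true := by
  obtain ⟨l, hlen, hmem, hsum⟩ := h
  have hperm : List.Perm (List.insertionSort (· ≤ ·) l) l := List.perm_insertionSort (· ≤ ·) l
  have hsorted : List.Pairwise (· ≤ ·) (List.insertionSort (· ≤ ·) l) :=
    List.sorted_insertionSort (· ≤ ·) l
  have := repF_complete k ts hsort hpos (l.insertionSort (· ≤ ·)) hsorted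
    (fun x hx => hmem x (hperm.mem_iff.mp hx))
    (by rw [hperm.length_eq, hlen])
  rwa [hperm.sum_eq, hsum] at this

-- ---- minK: the true minimal number of coins (proof layer only) ----
noncomputable def minK (C : List ℤ) (n : ℤ) : ℕ := sInf {k | HasRep C n k}

theorem hasRep_ones (C : List ℤ) (h1 : (1 : ℤ) ∈ C) (n : ℤ) (hn : 0 ≤ n) :
    HasRep C n n.toNat := by
  refine ⟨List.replicate n.toNat 1, by simp, ?_, ?_⟩
  · intro x hx
    rw [List.eq_of_mem_replicate hx]
    exact h1
  · simp; omega

theorem minK_nonempty (C : List ℤ) (h1 : (1 : ℤ) ∈ C) (n : ℤ) (hn : 0 ≤ n) :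
    {k | HasRep C n k}.Nonempty := ⟨n.toNat, hasRep_ones C h1 n hn⟩

theorem hasRep_minK (C : List ℤ) (h1 : (1 : ℤ) ∈ C) (n : ℤ) (hn : 0 ≤ n) :
    HasRep C n (minK C n) := Nat.sInf_mem (minK_nonempty C h1 n hn)

theorem minK_le (C : List ℤ) (n : ℤ) (k : ℕ) (h : HasRep C n k) : minK C n ≤ k :=
  Nat.sInf_le h

theorem not_hasRep_of_lt_minK (C : List ℤ) (n : ℤ) (j : ℕ) (h : j < minK C n) :
    ¬ HasRep C n j := by
  intro hrep
  have := Nat.sInf_le (s := {k | HasRep C n k}) hrep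
  unfold minK at h
  omega

-- ---- Bellman: bestP is the 999-capped minK ----
theorem bestP_eq_minK (C : List ℤ) (hpos : ∀ x ∈ C, 1 ≤ x) (h1 : (1 : ℤ) ∈ C) :
    ∀ n : ℕ, bestP C n = min ((minK C ((n : ℕ) : ℤ) : ℤ)) 999 := by
  intro n
  induction n using Nat.strong_induction_on with
  | _ n ih =>
    match n with
    | 0 =>
      have h0 : minK C 0 = 0 :=
        Nat.le_zero.mp (minK_le C 0 0 ⟨[], rfl, by simp, rfl⟩)
      simp [bestP_zero, h0]
    | n + 1 =>
      -- upper bound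
      obtain ⟨l, hlen, hmem, hsum⟩ :=
        hasRep_minK C h1 (((n + 1 : ℕ) : ℤ)) (by positivity)
      have hub : bestP C (n + 1) ≤ min ((minK C (((n + 1 : ℕ) : ℤ)) : ℤ)) 999 := by
        match l, hlen with
        | [], hlen =>
          exfalso
          simp at hsum
          omega
        | a :: l₂, hlen =>
          have haC : a ∈ C := hmem a (by simp)
          have ha1 : 1 ≤ a := hpos a haC
          have hsum2 : 0 ≤ l₂.sum :=
            List.sum_nonneg (fun x hx => by have := hpos x (hmem x (by simp [hx])); omega)
          have han : a ≤ ((n + 1 : ℕ) : ℤ) := by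
            have : a + l₂.sum = ((n + 1 : ℕ) : ℤ) := by simpa using hsum
            omega
          have hrep2 : HasRep C (((n + 1 : ℕ) : ℤ) - a) l₂.length :=
            ⟨l₂, rfl, fun x hx => hmem x (by simp [hx]), by simp at hsum; omega⟩
          have hK' := minK_le C (((n + 1 : ℕ) : ℤ) - a) l₂.length hrep2
          have hcast : ((n + 1 - a.toNat : ℕ) : ℤ) = ((n + 1 : ℕ) : ℤ) - a := by omega
          have hstep := bestP_step C (n + 1) a haC ha1 (by exact_mod_cast han)
          have hih := ih (n + 1 - a.toNat) (by omega)
          rw [hcast] at hih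
          have hM : minK C (((n + 1 : ℕ) : ℤ)) = l₂.length + 1 := by
            simpa using hlen.symm
          have hcap := bestP_le_999 C (n + 1)
          omega
      -- lower bound
      have hlb : min ((minK C (((n + 1 : ℕ) : ℤ)) : ℤ)) 999 ≤ bestP C (n + 1) := by
        rw [bestP_succ]
        refine fmin_ge _ _ (by omega) ?_
        intro v hv
        obtain ⟨c, hc, rfl⟩ := List.mem_map.mp hv
        have hcf := List.mem_filter.mp hc
        have hcb : 1 ≤ c ∧ c ≤ ((n + 1 : ℕ) : ℤ) := by
          have := hcf.2; simp [bestPred] at this; exact_mod_cast this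
        have hcC : c ∈ C := hcf.1
        have hih := ih (n + 1 - c.toNat) (by omega)
        have hcast : ((n + 1 - c.toNat : ℕ) : ℤ) = ((n + 1 : ℕ) : ℤ) - c := by omega
        rw [hcast] at hih
        -- minK (n+1) ≤ minK (n+1-c) + 1
        obtain ⟨l, hlen, hmem, hsum⟩ :=
          hasRep_minK C h1 (((n + 1 : ℕ) : ℤ) - c) (by omega)
        have hrep : HasRep C (((n + 1 : ℕ) : ℤ)) (minK C (((n + 1 : ℕ) : ℤ) - c) + 1) := by
          refine ⟨c :: l, by simp [hlen], ?_, by rw [List.sum_cons, hsum]; omega⟩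
          intro x hx
          rcases List.mem_cons.mp hx with rfl | hx
          · exact hcC
          · exact hmem x hx
        have := minK_le C (((n + 1 : ℕ) : ℤ)) _ hrep
        omega
      omega

-- ---- the first-hit search over range 1000 ----
theorem find?_range_eq_some (p : ℕ → Bool) (k : ℕ) (hp : p k = true)
    (hmin : ∀ j, j < k → p j = false) :
    ∀ m : ℕ, k < m → (List.range m).find? p = some k := by
  intro m
  induction m with
  | zero => omega
  | succ m ih =>
    intro hk
    rw [List.range_succ, List.find?_append]
    rcases Nat.lt_or_ge k m with h | h
    · rw [ih h]; rfl
    · have hk' : k = m := by omega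
      subst hk'
      have hnone : (List.range k).find? p = none := by
        rw [List.find?_eq_none]
        intro x hx
        simp [hmin x (List.mem_range.mp hx)]
      rw [hnone]
      simp [List.find?, hp]

theorem find?_range_eq_none (p : ℕ → Bool) (m : ℕ)
    (h : ∀ j, j < m → p j = false) : (List.range m).find? p = none := by
  rw [List.find?_eq_none]
  intro x hx
  simp [h x (List.mem_range.mp hx)]

-- ---- end-to-end characterization of B ----
theorem get_count_alt_eq (n : ℕ) (hn : 1 ≤ n) :
    get_count_alt ((n : ℕ) : ℤ) = bestP (tlist ((n : ℕ) : ℤ) 1) n := by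
  have hN1 : (1 : ℤ) ≤ ((n : ℕ) : ℤ) := by exact_mod_cast hn
  set C := tlist ((n : ℕ) : ℤ) 1 with hC
  have hsort : C.Pairwise (· < ·) := tlist_pairwise _ 1
  have hpos : ∀ x ∈ C, 1 ≤ x := tlist_pos _
  have h1 : (1 : ℤ) ∈ C := one_mem_tlist _ hN1
  have hcoins : coins_loop ((n : ℕ) : ℤ) 1 [] (by norm_num) = C := by
    have h := coins_loop_eq ((n : ℕ) : ℤ) 1 (by norm_num) []
    simpa using h
  have hiff : ∀ k : ℕ, repF k ((n : ℕ) : ℤ) C = true ↔ HasRep C ((n : ℕ) : ℤ) k := by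
    intro k
    exact ⟨repF_sound k _ C, hasRep_repF k C hsort hpos _⟩
  rw [bestP_eq_minK C hpos h1 n]
  simp only [get_count_alt, hcoins]
  set M := minK C ((n : ℕ) : ℤ) with hM
  rcases Nat.lt_or_ge M 1000 with hlt | hge
  · have hfind : (List.range 1000).find? (fun c => repF c ((n : ℕ) : ℤ) C) = some M := by
      refine find?_range_eq_some _ M ?_ ?_ 1000 hlt
      · exact (hiff M).mpr (hasRep_minK C h1 _ (by omega))
      · intro j hj
        by_contra hb
        have : repF j ((n : ℕ) : ℤ) C = true := by
          cases hrj : repF j ((n : ℕ) : ℤ) C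
          · exact absurd hrj hb
          · rfl
        exact not_hasRep_of_lt_minK C _ j hj ((hiff j).mp this)
    rw [hfind]
    have hred : (match some M with | some c => ((c : ℕ) : ℤ) | none => (999 : ℤ)) = ((M : ℕ) : ℤ) := rfl
    rw [hred]
    omega
  · have hfind : (List.range 1000).find? (fun c => repF c ((n : ℕ) : ℤ) C) = none := by
      refine find?_range_eq_none _ 1000 ?_
      intro j hj
      by_contra hb
      have : repF j ((n : ℕ) : ℤ) C = true := by
        cases hrj : repF j ((n : ℕ) : ℤ) C
        · exact absurd hrj hb
        · rfl
      exact not_hasRep_of_lt_minK C _ j (by omega) ((hiff j).mp this)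
    rw [hfind]
    have hred : (match (none : Option ℕ) with | some c => ((c : ℕ) : ℤ) | none => (999 : ℤ)) = (999 : ℤ) := rfl
    rw [hred]
    omega

-- ---- the two witness evaluations at N = 0 ----
theorem get_count_zero : get_count 0 = 999 := by
  have hloop : get_count_loop 0 1 1 1 [1] (by norm_num) (by norm_num) = [1] := by
    rw [get_count_loop]
    norm_num
  simp only [get_count, hloop]
  decide

theorem get_count_alt_zero : get_count_alt 0 = 0 := by
  have hcoins : coins_loop 0 1 [] (by norm_num) = [] := by
    rw [coins_loop]
    norm_num
  simp only [get_count_alt, hcoins]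
  have hfind : (List.range 1000).find? (fun c => repF c 0 []) = some 0 := by
    refine find?_range_eq_some _ 0 ?_ (by omega) 1000 (by norm_num)
    show repF 0 0 [] = true
    rw [repF]
    rfl
  rw [hfind]
  rfl

-- ===== VERDICT (by name: the statement is the Claim_ definition above) =====
theorem get_count_spec : Claim_unchanged_get_count := by
  intro N _ hpre hnd
  have hn : N = ((N.toNat : ℕ) : ℤ) := by
    unfold Pre_get_count at hpre; omega
  have h1 : 1 ≤ N.toNat := by
    unfold Pre_get_count at hpre; unfold D_get_count at hnd; omega
  rw [hn, get_count_eq N.toNat h1, get_count_alt_eq N.toNat h1]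

theorem get_count_changed : Claim_changed_get_count := by
  unfold Claim_changed_get_count
  refine ⟨by decide, by norm_num [Pre_get_count, pvDiffWitness_get_count], rfl,
    get_count_zero, get_count_alt_zero, by norm_num [pvDiffWitnessOut_get_count]⟩

theorem get_count_tight : Claim_exact_get_count := by
  intro N _ _ hd
  unfold D_get_count at hd
  subst hd
  rw [get_count_zero, get_count_alt_zero]
  norm_num
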